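-- pv_equiv track=rewrite | github.com/daniel-reich/ubiquitous-fiesta | mm2fm6ynbR7HQQm9z_8.py | knights_jump
-- ===== SOURCE A (Python) =====
-- def knights_jump(square):
--   alpha='ABCDEFGH'
--   a, k=alpha.find(square[0])+1, int(square[1])
--   A=[]
--   for i in range(1, 9):
--     for j in range(1, 9):
--       if (abs(i-k)==2 and abs(j-a)==1) or (abs(i-k)==1 and abs(j-a)==2):
--         A.append((j-1, i))
--   B=[''.join([alpha[x[0]], str(x[1])]) for x in A]
--   return ','.join(B)
-- ===== SOURCE B (Python) =====
-- def knights_jump(square):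
--   alpha = 'ABCDEFGH'
--   a = alpha.find(square[0]) + 1
--   k = int(square[1])
--   out = []
--   # offsets in lexicographic order, so targets come out sorted by (rank, file),
--   # matching A's row-then-column emission order
--   for di, dj in ((-2, -1), (-2, 1), (-1, -2), (-1, 2), (1, -2), (1, 2), (2, -1), (2, 1)):
--     i, f = k + di, a + dj
--     if 1 <= i <= 8 and 1 <= f <= 8:
--       out.append(alpha[f - 1] + str(i))
--   return ','.join(out)
-- ===== Notes on version B (the rewrite author's own statement) =====
-- stated objective: simpler
-- what changed: Instead of scanning all 64 board squares with a nested loop testing the knight-distance predicate, B enumerates the 8 knight offsets in lexicographic order, keeps the in-board targets, and formats them directly.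
import Mathlib
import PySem

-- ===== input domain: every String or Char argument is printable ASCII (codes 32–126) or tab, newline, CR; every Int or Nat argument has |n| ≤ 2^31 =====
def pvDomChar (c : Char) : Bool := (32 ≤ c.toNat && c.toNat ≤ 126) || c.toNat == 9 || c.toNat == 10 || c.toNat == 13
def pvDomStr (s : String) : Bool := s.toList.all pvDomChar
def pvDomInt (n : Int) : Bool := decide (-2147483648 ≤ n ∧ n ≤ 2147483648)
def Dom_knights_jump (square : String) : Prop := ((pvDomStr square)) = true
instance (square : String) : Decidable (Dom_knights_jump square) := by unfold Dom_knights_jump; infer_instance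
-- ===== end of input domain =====

-- B replaces A's 64-square board scan by enumerating the 8 knight offsets in
-- lexicographic order (simpler; same observable behaviour).

-- ===== PORT A =====
-- the body of A after a = alpha.find(square[0])+1 and k = int(square[1]) are computed
def kjCoreA (a k : Int) : String :=
  -- for i in range(1,9): for j in range(1,9): if knight-distance: A.append((j-1, i))
  let A : List (Int × Int) :=
    (PySem.List.pyRange 1 9 1).foldl (fun acc i =>
      (PySem.List.pyRange 1 9 1).foldl (fun acc2 j =>
        if ((i - k).natAbs = 2 ∧ (j - a).natAbs = 1) ∨ ((i - k).natAbs = 1 ∧ (j - a).natAbs = 2)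
        then acc2 ++ [(j - 1, i)] else acc2) acc) []
  -- B=[''.join([alpha[x[0]], str(x[1])]) for x in A]  (x[0]=j-1 ∈ 0..7, always in range,
  -- so the total pyGetD with a dummy default is exact here)
  let B : List String := A.map (fun x =>
    PySem.Str.join "" [String.ofList [PySem.List.pyGetD "ABCDEFGH".toList x.1 'A'], PySem.Int.toStr x.2])
  PySem.Str.join "," B

def knights_jump (square : String) : String :=
  match PySem.Str.pyGet? square 0, PySem.Str.pyGet? square 1 with
  | some c0, some c1 =>
    match PySem.Int.ofChars? [c1] with        -- int(square[1])
    | some k => kjCoreA (PySem.Str.find "ABCDEFGH" (String.ofList [c0]) + 1) k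
    | none => ""                              -- ValueError: excluded by Pre_
  | _, _ => ""                                -- IndexError: excluded by Pre_

-- ===== PORT B =====
-- the body of B after a and k are computed: scan the 8 offsets, keep in-board targets
def kjCoreB (a k : Int) : String :=
  let offs : List (Int × Int) := [(-2,-1),(-2,1),(-1,-2),(-1,2),(1,-2),(1,2),(2,-1),(2,1)]
  let out : List String := offs.foldl (fun acc d =>
    let i := k + d.1
    let f := a + d.2
    if 1 ≤ i ∧ i ≤ 8 ∧ 1 ≤ f ∧ f ≤ 8 then
      -- alpha[f-1] + str(i); f-1 ∈ 0..7 under the guard, so the total pyGetD is exact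
      acc ++ [PySem.Str.join "" [String.ofList [PySem.List.pyGetD "ABCDEFGH".toList (f - 1) 'A'], PySem.Int.toStr i]]
    else acc) []
  PySem.Str.join "," out

def knights_jump_alt (square : String) : String :=
  match PySem.Str.pyGet? square 0 with
  | none => ""
  | some c0 =>
    match PySem.Str.pyGet? square 1 with
    | none => ""
    | some c1 =>
      match PySem.Int.ofChars? [c1] with
      | none => ""
      | some k => kjCoreB (PySem.Str.find "ABCDEFGH" (String.ofList [c0]) + 1) k

-- ===== PRECONDITION & SPEC =====
-- Pre_ excludes exactly the inputs where A raises: strings of length < 2 (IndexError on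
-- square[0]/square[1]) and strings whose second character is not a decimal digit
-- (ValueError from int(square[1]); within ASCII, int of a single char needs a digit).
def Pre_knights_jump (square : String) : Prop :=
  (match square.toList with
   | _ :: c1 :: _ => c1.isDigit
   | _ => false) = true
instance (square : String) : Decidable (Pre_knights_jump square) := by
  unfold Pre_knights_jump; infer_instance

def pvWitness_knights_jump : String := "B1"

def Spec_knights_jump (square : String) (out : String) : Prop := out = knights_jump_alt square
instance (square : String) (out : String) : Decidable (Spec_knights_jump square out) := by unfold Spec_knights_jump; infer_instance

-- ===== CLAIM (what is proved, stated in full; the proofs are below) =====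
def Claim_equal_knights_jump : Prop := ∀ (square : String), Dom_knights_jump square → Pre_knights_jump square → Spec_knights_jump square (knights_jump square)

-- ===== LEMMAS AND PROOFS =====

-- int() of a single digit character returns its value, a number in 0..9
theorem kj_ofChars_digit (c : Char) (h : c.isDigit = true) :
    ∃ kn : Nat, kn ≤ 9 ∧ PySem.Int.ofChars? [c] = some (kn : Int) := by
  have hb : 48 ≤ c.toNat ∧ c.toNat ≤ 57 := by
    simp only [Char.isDigit, decide_eq_true_eq, Bool.and_eq_true] at h
    exact ⟨h.1, h.2⟩
  obtain ⟨n, hn1, hn2, hc⟩ : ∃ n, 48 ≤ n ∧ n ≤ 57 ∧ c = Char.ofNat n :=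
    ⟨c.toNat, hb.1, hb.2, (Char.ofNat_toNat c).symm⟩
  subst hc
  interval_cases n <;> first
    | exact ⟨0, by decide⟩ | exact ⟨1, by decide⟩ | exact ⟨2, by decide⟩ | exact ⟨3, by decide⟩
    | exact ⟨4, by decide⟩ | exact ⟨5, by decide⟩ | exact ⟨6, by decide⟩ | exact ⟨7, by decide⟩
    | exact ⟨8, by decide⟩ | exact ⟨9, by decide⟩

-- the two loop bodies agree for every reachable (file, rank) source pair
theorem kjCore_eq (an kn : Nat) (ha : an ≤ 9) (hk : kn ≤ 9) :
    kjCoreA (an : Int) (kn : Int) = kjCoreB (an : Int) (kn : Int) := by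
  interval_cases an <;> interval_cases kn <;> decide

-- ===== VERDICT (by name: the statement is the Claim_ definition above) =====
theorem knights_jump_spec : Claim_equal_knights_jump := by
  intro square _ hpre
  unfold Spec_knights_jump knights_jump knights_jump_alt
  unfold Pre_knights_jump at hpre
  cases hsq : square.toList with
  | nil => rw [hsq] at hpre; simp at hpre
  | cons c0 t =>
    cases t with
    | nil => rw [hsq] at hpre; simp at hpre
    | cons c1 rest =>
      rw [hsq] at hpre
      have h0 : PySem.Str.pyGet? square 0 = some c0 := by
        simp [hsq]
      have h1 : PySem.Str.pyGet? square 1 = some c1 := by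
        simp [hsq]
      obtain ⟨kn, hk9, hko⟩ := kj_ofChars_digit c1 hpre
      rw [h0, h1]; dsimp only; rw [hko]
      have hf1 : -1 ≤ PySem.Str.find "ABCDEFGH" (String.ofList [c0]) := by
        rw [PySem.Str.find_eq]; exact PySem.Chars.neg_one_le_find _ _
      have hf2 : PySem.Str.find "ABCDEFGH" (String.ofList [c0]) ≤ 8 := by
        rw [PySem.Str.find_eq]
        exact le_trans (PySem.Chars.find_le_length _ _) (by decide)
      obtain ⟨an, ha9, hae⟩ : ∃ an : Nat, an ≤ 9 ∧
          PySem.Str.find "ABCDEFGH" (String.ofList [c0]) + 1 = (an : Int) := by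
        refine ⟨(PySem.Str.find "ABCDEFGH" (String.ofList [c0]) + 1).toNat, ?_, ?_⟩ <;> omega
      rw [hae]
      exact kjCore_eq an kn ha9 hk9
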